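-- pv_equiv track=rewrite | github.com/taijara/MinesweeperSolver | RegraProbabilidade.py | qtdQuadradosVizinhos
-- ===== SOURCE A (Python) =====
-- def qtdQuadradosVizinhos(n_linhas, n_colunas):
--     qtd = 0
--     for i in range(n_linhas):
--         for j in range(n_colunas):
--             if (j - 1) >= 0:
--                 qtd = qtd + 1
--             if (j + 1) <= n_colunas - 1:
--                 qtd = qtd + 1
--             if i - 1 >= 0:
--                 qtd = qtd + 1
--             if i + 1 <= n_linhas - 1:
--                 qtd = qtd + 1
--             if i - 1 >= 0 and (j - 1) >= 0:
--                 qtd = qtd + 1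
--             if i + 1 <= n_linhas - 1 and (j + 1) <= n_colunas - 1:
--                 qtd = qtd + 1
--             if i - 1 >= 0 and (j + 1) <= n_colunas - 1:
--                 qtd = qtd + 1
--             if i + 1 <= n_linhas - 1 and (j - 1) >= 0:
--                 qtd = qtd + 1
--     return qtd
-- ===== SOURCE B (Python) =====
-- def qtdQuadradosVizinhos(n_linhas, n_colunas):
--     if n_linhas <= 0 or n_colunas <= 0:
--         return 0
--     return 8 * n_linhas * n_colunas - 6 * (n_linhas + n_colunas) + 4
-- ===== Notes on version B (the rewrite author's own statement) =====
-- stated objective: faster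
-- what changed: Replaces the double loop over all grid cells that tests the 8 neighbor directions per cell with the closed-form edge count 8*R*C - 6*(R+C) + 4 of the king graph (0 when a dimension is non-positive).
import Mathlib
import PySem

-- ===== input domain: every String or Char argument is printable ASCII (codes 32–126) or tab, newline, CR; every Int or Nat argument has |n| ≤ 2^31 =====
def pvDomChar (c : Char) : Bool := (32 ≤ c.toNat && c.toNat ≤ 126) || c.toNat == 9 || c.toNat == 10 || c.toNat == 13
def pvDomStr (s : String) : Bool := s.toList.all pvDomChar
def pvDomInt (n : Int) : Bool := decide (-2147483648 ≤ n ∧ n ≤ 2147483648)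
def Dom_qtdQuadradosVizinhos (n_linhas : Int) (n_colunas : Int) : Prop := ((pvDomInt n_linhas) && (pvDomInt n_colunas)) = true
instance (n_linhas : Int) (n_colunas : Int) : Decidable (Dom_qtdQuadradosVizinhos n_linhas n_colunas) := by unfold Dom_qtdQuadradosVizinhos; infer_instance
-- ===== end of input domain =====

-- B replaces A's O(R*C) double loop (8 neighbor tests per cell) with the O(1)
-- closed-form king-graph degree sum 8*R*C - 6*(R+C) + 4 (0 if a dimension is ≤ 0).

-- ===== PORT A =====
-- the body of A's inner loop: the 8 sequential neighbor tests on cell (i, j)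
def pvCellA (n_linhas n_colunas i j qtd : Int) : Int :=
  let qtd := if 0 ≤ j - 1 then qtd + 1 else qtd
  let qtd := if j + 1 ≤ n_colunas - 1 then qtd + 1 else qtd
  let qtd := if 0 ≤ i - 1 then qtd + 1 else qtd
  let qtd := if i + 1 ≤ n_linhas - 1 then qtd + 1 else qtd
  let qtd := if 0 ≤ i - 1 ∧ 0 ≤ j - 1 then qtd + 1 else qtd
  let qtd := if i + 1 ≤ n_linhas - 1 ∧ j + 1 ≤ n_colunas - 1 then qtd + 1 else qtd
  let qtd := if 0 ≤ i - 1 ∧ j + 1 ≤ n_colunas - 1 then qtd + 1 else qtd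
  let qtd := if i + 1 ≤ n_linhas - 1 ∧ 0 ≤ j - 1 then qtd + 1 else qtd
  qtd

def qtdQuadradosVizinhos (n_linhas : Int) (n_colunas : Int) : Int :=
  (PySem.List.pyRange 0 n_linhas 1).foldl
    (fun qtd i =>
      (PySem.List.pyRange 0 n_colunas 1).foldl
        (fun qtd j => pvCellA n_linhas n_colunas i j qtd) qtd)
    0

-- ===== PORT B =====
def qtdQuadradosVizinhos_alt (n_linhas : Int) (n_colunas : Int) : Int :=
  if n_linhas ≤ 0 ∨ n_colunas ≤ 0 then 0
  else 8 * n_linhas * n_colunas - 6 * (n_linhas + n_colunas) + 4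

-- ===== PRECONDITION & SPEC =====
def Spec_qtdQuadradosVizinhos (n_linhas : Int) (n_colunas : Int) (out : Int) : Prop := out = qtdQuadradosVizinhos_alt n_linhas n_colunas
instance (n_linhas : Int) (n_colunas : Int) (out : Int) : Decidable (Spec_qtdQuadradosVizinhos n_linhas n_colunas out) := by unfold Spec_qtdQuadradosVizinhos; infer_instance

-- ===== CLAIM (what is proved, stated in full; the proofs are below) =====
def Claim_equal_qtdQuadradosVizinhos : Prop := ∀ (n_linhas : Int) (n_colunas : Int), Dom_qtdQuadradosVizinhos n_linhas n_colunas → Spec_qtdQuadradosVizinhos n_linhas n_colunas (qtdQuadradosVizinhos n_linhas n_colunas)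

-- ===== LEMMAS AND PROOFS =====

-- vertical-neighbor count of a row i, horizontal-neighbor count of a column j
def pvU (R i : Int) : Int := (if 0 ≤ i - 1 then 1 else 0) + (if i + 1 ≤ R - 1 then 1 else 0)
def pvLR (C j : Int) : Int := (if 0 ≤ j - 1 then 1 else 0) + (if j + 1 ≤ C - 1 then 1 else 0)

set_option maxHeartbeats 1000000 in
lemma cellA_eq (R C i j q : Int) :
    pvCellA R C i j q = q + (1 + pvU R i) * pvLR C j + pvU R i := by
  simp only [pvCellA, pvU, pvLR]
  split_ifs <;> omega

lemma inner_closed (R i : Int) (k t : Nat) (ht : t ≤ k) (q : Int) :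
    (PySem.List.pyRange 0 (t : Int) 1).foldl
      (fun qtd j => pvCellA R (k : Int) i j qtd) q
    = q + (1 + pvU R i) * (((t - 1 : Nat) : Int) + ((min t (k - 1) : Nat) : Int))
        + (t : Int) * pvU R i := by
  induction t generalizing q with
  | zero => simp [PySem.List.pyRange_one_eq_nil]
  | succ t ih =>
    have h1 : ((t + 1 : Nat) : Int) = (t : Int) + 1 := by push_cast; ring
    rw [h1, PySem.List.pyRange_one_succ_right (by positivity), List.foldl_append]
    rw [ih (by omega)]
    simp only [List.foldl_cons, List.foldl_nil, cellA_eq]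
    have h2 : ((t + 1 - 1 : Nat) : Int) + ((min (t + 1) (k - 1) : Nat) : Int)
        = ((t - 1 : Nat) : Int) + ((min t (k - 1) : Nat) : Int) + pvLR (k : Int) (t : Int) := by
      simp only [pvLR]
      split_ifs <;> push_cast <;> omega
    rw [h2]; ring

lemma outer_closed (m k s : Nat) (hs : s ≤ m) (q : Int) :
    (PySem.List.pyRange 0 (s : Int) 1).foldl
      (fun qtd i =>
        (PySem.List.pyRange 0 (k : Int) 1).foldl
          (fun qtd j => pvCellA (m : Int) (k : Int) i j qtd) qtd) q
    = q + (s : Int) * (2 * ((k - 1 : Nat) : Int))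
        + (2 * ((k - 1 : Nat) : Int) + (k : Int))
          * (((s - 1 : Nat) : Int) + ((min s (m - 1) : Nat) : Int)) := by
  induction s generalizing q with
  | zero => simp [PySem.List.pyRange_one_eq_nil]
  | succ s ih =>
    have h1 : ((s + 1 : Nat) : Int) = (s : Int) + 1 := by push_cast; ring
    rw [h1, PySem.List.pyRange_one_succ_right (by positivity), List.foldl_append]
    rw [ih (by omega)]
    simp only [List.foldl_cons, List.foldl_nil]
    rw [inner_closed (m : Int) (s : Int) k k le_rfl]
    have hmin : ((min k (k - 1) : Nat) : Int) = ((k - 1 : Nat) : Int) := by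
      push_cast; omega
    rw [hmin]
    have h2 : ((s + 1 - 1 : Nat) : Int) + ((min (s + 1) (m - 1) : Nat) : Int)
        = ((s - 1 : Nat) : Int) + ((min s (m - 1) : Nat) : Int) + pvU (m : Int) (s : Int) := by
      simp only [pvU]
      split_ifs <;> push_cast <;> omega
    rw [h2]; ring

-- ===== VERDICT (by name: the statement is the Claim_ definition above) =====
theorem qtdQuadradosVizinhos_spec : Claim_equal_qtdQuadradosVizinhos := by
  intro R C _
  unfold Spec_qtdQuadradosVizinhos qtdQuadradosVizinhos qtdQuadradosVizinhos_alt
  by_cases hR : R ≤ 0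
  · rw [PySem.List.pyRange_one_eq_nil hR]
    simp [hR]
  · by_cases hC : C ≤ 0
    · rw [PySem.List.pyRange_one_eq_nil hC]
      simp only [List.foldl_nil]
      have : ∀ l : List Int, l.foldl (fun (qtd : Int) (_ : Int) => qtd) 0 = 0 := by
        intro l; induction l with
        | nil => rfl
        | cons a l ihl => exact ihl
      rw [this]
      simp [hC]
    · have hm : R = ((R.toNat : Nat) : Int) := by omega
      have hk : C = ((C.toNat : Nat) : Int) := by omega
      rw [hm, hk, outer_closed R.toNat C.toNat R.toNat le_rfl]
      have hmin : ((min R.toNat (R.toNat - 1) : Nat) : Int) = ((R.toNat - 1 : Nat) : Int) := by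
        omega
      rw [hmin]
      have h1 : 1 ≤ R.toNat := by omega
      have h2 : 1 ≤ C.toNat := by omega
      rw [if_neg (by omega)]
      push_cast [Nat.cast_sub h1, Nat.cast_sub h2]
      ring
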